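-- pv_equiv track=rewrite | github.com/neil4droid/competitive-coding | leetcode/leetcode-medium/lc_1277_count_square_submatrices.py | count_squares_dp_2
-- ===== SOURCE A (Python) =====
-- from typing import List
--
-- def count_squares_dp_2(matrix: List[List[int]]) -> int:
--     """
--     Method shown in: https://youtu.be/_Lf1looyJMU
--
--     Runtime: 672 ms, faster than 70.82% of Python3 online submissions for Count Square Submatrices with All Ones.
--
--     Memory Usage: 14.7 MB, less than 100.00% of Python3 online submissions for Count Square Submatrices with All Ones.
--     """
--     if not matrix: return 0
--
--     r, c = len(matrix), len(matrix[0])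
--     dp = [[0]*(c+1) for _ in range(0, r+1)]
--
--     count = 0
--     for i in range(1, r+1):
--         for j in range(1, c+1):
--             dp[i][j] = matrix[i-1][j-1] if matrix[i-1][j-1] == 0 else min(dp[i][j-1], dp[i-1][j-1], dp[i-1][j])+1
--             count += dp[i][j]
--
--     return count
-- ===== SOURCE B (Python) =====
-- def count_squares_dp_2(matrix):
--     if not matrix:
--         return 0
--     r, c = len(matrix), len(matrix[0])
--     # 2D prefix-sum table of the binarized matrix (non-zero -> 1)
--     pref = [[0] * (c + 1)]
--     for i in range(r):
--         row = [0]
--         for j in range(c):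
--             row.append(pref[i][j + 1] + row[j] - pref[i][j] + (1 if matrix[i][j] != 0 else 0))
--         pref.append(row)
--     count = 0
--     for i in range(1, r + 1):
--         for j in range(1, c + 1):
--             for k in range(1, min(i, j) + 1):
--                 if pref[i][j] - pref[i - k][j] - pref[i][j - k] + pref[i - k][j - k] == k * k:
--                     count += 1
--     return count
-- ===== Notes on version B (the rewrite author's own statement) =====
-- stated objective: alternative
-- what changed: Replaces A's min-of-three DP recurrence with a 2D prefix-sum table over the binarized matrix plus an explicit per-cell scan over square sides k, counting the sides whose k-by-k block sum equals k*k.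
import Mathlib
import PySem

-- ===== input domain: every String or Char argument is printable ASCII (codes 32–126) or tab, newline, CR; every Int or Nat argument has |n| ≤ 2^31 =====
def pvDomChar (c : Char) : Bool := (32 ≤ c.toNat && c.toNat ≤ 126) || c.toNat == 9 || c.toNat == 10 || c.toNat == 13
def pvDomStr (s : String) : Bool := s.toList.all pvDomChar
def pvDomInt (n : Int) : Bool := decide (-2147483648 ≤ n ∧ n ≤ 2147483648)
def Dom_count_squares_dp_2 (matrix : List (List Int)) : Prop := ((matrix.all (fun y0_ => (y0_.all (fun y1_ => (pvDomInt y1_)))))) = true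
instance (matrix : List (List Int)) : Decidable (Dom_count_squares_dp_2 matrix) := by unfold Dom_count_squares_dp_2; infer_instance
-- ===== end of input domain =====

-- B replaces A's min-of-three DP recurrence by a 2D prefix-sum table over the binarized
-- matrix plus an explicit per-cell scan over square sizes (objective: alternative algorithm).

-- ===== PORT A =====
-- 2D read 'dp[i][j]' / 'matrix[i][j]' (all indices reached here are nonnegative and,
-- under Pre_, in range in both Pythons)
def pvGet2 (t : List (List Int)) (i j : Int) : Int :=
  PySem.List.pyGetD (PySem.List.pyGetD t i []) j 0
def pvSet2 (t : List (List Int)) (i j : Int) (v : Int) : List (List Int) :=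
  PySem.List.pySetD t i (PySem.List.pySetD (PySem.List.pyGetD t i []) j v)
def pvAinner (matrix : List (List Int)) (i : Int) (st : List (List Int) × Int) (j : Int) :
    List (List Int) × Int :=
  let mij := pvGet2 matrix (i-1) (j-1)
  let v := if mij = 0 then mij
           else min (min (pvGet2 st.1 i (j-1)) (pvGet2 st.1 (i-1) (j-1))) (pvGet2 st.1 (i-1) j) + 1
  (pvSet2 st.1 i j v, st.2 + v)
def pvAouter (matrix : List (List Int)) (c : Nat) (st : List (List Int) × Int) (i : Int) :
    List (List Int) × Int :=
  (PySem.List.pyRange 1 ((c : Int)+1) 1).foldl (pvAinner matrix i) st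
def count_squares_dp_2 (matrix : List (List Int)) : Int :=
  if matrix = [] then 0
  else
    let r := matrix.length
    let c := (matrix.headD []).length
    let dp0 := (PySem.List.pyRange 0 ((r : Int)+1) 1).map (fun _ => List.replicate (c+1) (0 : Int))
    ((PySem.List.pyRange 1 ((r : Int)+1) 1).foldl (pvAouter matrix c) (dp0, 0)).2

-- ===== PORT B =====
def pvBrow (matrix : List (List Int)) (P : List (List Int)) (i : Int) (row : List Int) (j : Int) :
    List Int :=
  row ++ [pvGet2 P i (j+1) + PySem.List.pyGetD row j 0 - pvGet2 P i j +
          (if pvGet2 matrix i j ≠ 0 then 1 else 0)]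
def pvBpref (matrix : List (List Int)) (c : Nat) (P : List (List Int)) (i : Int) :
    List (List Int) :=
  P ++ [(PySem.List.pyRange 0 (c : Int) 1).foldl (pvBrow matrix P i) [0]]
def pvBk (pref : List (List Int)) (i j : Int) (cnt : Int) (k : Int) : Int :=
  if pvGet2 pref i j - pvGet2 pref (i-k) j - pvGet2 pref i (j-k) + pvGet2 pref (i-k) (j-k) = k*k
  then cnt + 1 else cnt
def pvBj (pref : List (List Int)) (i : Int) (cnt : Int) (j : Int) : Int :=
  (PySem.List.pyRange 1 (min i j + 1) 1).foldl (pvBk pref i j) cnt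
def pvBi (pref : List (List Int)) (c : Nat) (cnt : Int) (i : Int) : Int :=
  (PySem.List.pyRange 1 ((c : Int)+1) 1).foldl (pvBj pref i) cnt
def count_squares_dp_2_alt (matrix : List (List Int)) : Int :=
  if matrix = [] then 0
  else
    let r := matrix.length
    let c := (matrix.headD []).length
    let pref := (PySem.List.pyRange 0 ((r : Int)) 1).foldl (pvBpref matrix c)
                  [List.replicate (c+1) (0 : Int)]
    (PySem.List.pyRange 1 ((r : Int)+1) 1).foldl (pvBi pref c) 0


-- ===== PRECONDITION & SPEC =====
-- Pre_ excludes ragged matrices having a row shorter than the first row: there Python A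
-- (and Python B alike) raises IndexError.
def Pre_count_squares_dp_2 (matrix : List (List Int)) : Prop :=
  ∀ row ∈ matrix, (matrix.headD []).length ≤ row.length
instance (matrix : List (List Int)) : Decidable (Pre_count_squares_dp_2 matrix) := by
  unfold Pre_count_squares_dp_2; infer_instance
def pvWitness_count_squares_dp_2 : List (List Int) := [[1, 0], [1, 1]]

def Spec_count_squares_dp_2 (matrix : List (List Int)) (out : Int) : Prop :=
  out = count_squares_dp_2_alt matrix
instance (matrix : List (List Int)) (out : Int) : Decidable (Spec_count_squares_dp_2 matrix out) := by
  unfold Spec_count_squares_dp_2; infer_instance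

-- ===== CLAIM (what is proved, stated in full; the proofs are below) =====
def Claim_equal_count_squares_dp_2 : Prop := ∀ (matrix : List (List Int)), Dom_count_squares_dp_2 matrix → Pre_count_squares_dp_2 matrix → Spec_count_squares_dp_2 matrix (count_squares_dp_2 matrix)

-- ===== LEMMAS AND PROOFS =====

def cellM (m : List (List Int)) (x y : Nat) : Int := (m.getD x []).getD y 0
def bN (m : List (List Int)) (x y : Nat) : Nat := if cellM m x y = 0 then 0 else 1
def psN (m : List (List Int)) (i j : Nat) : Nat :=
  ∑ x ∈ Finset.range i, ∑ y ∈ Finset.range j, bN m x y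
def sM (m : List (List Int)) : Nat → Nat → Nat
  | 0, _ => 0
  | _+1, 0 => 0
  | (i+1), (j+1) =>
    if cellM m i j = 0 then 0
    else min (min (sM m (i+1) j) (sM m i j)) (sM m i (j+1)) + 1
termination_by i j => (i, j)
def AllOne (m : List (List Int)) (i j k : Nat) : Prop :=
  ∀ x y, i - k ≤ x → x < i → j - k ≤ y → y < j → cellM m x y ≠ 0

theorem sM_zero_left (m : List (List Int)) (j : Nat) : sM m 0 j = 0 := by
  cases j <;> simp [sM]

theorem sM_zero_right (m : List (List Int)) (i : Nat) : sM m i 0 = 0 := by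
  cases i <;> simp [sM]

theorem sM_le_min (m : List (List Int)) : ∀ n i j, i + j ≤ n → sM m i j ≤ min i j := by
  intro n
  induction n with
  | zero =>
    intro i j h
    have hi : i = 0 := by omega
    subst hi; simp [sM_zero_left]
  | succ n ih =>
    intro i j h
    match i, j with
    | 0, j => simp [sM_zero_left]
    | i+1, 0 => simp [sM_zero_right]
    | i+1, j+1 =>
      rw [sM]
      split
      · omega
      · have h1 := ih (i+1) j (by omega)
        have h2 := ih i j (by omega)
        have h3 := ih i (j+1) (by omega)
        omega

theorem allone_succ (m : List (List Int)) (i j k : Nat) (hk : k ≤ i) (hk' : k ≤ j) :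
    AllOne m (i+1) (j+1) (k+1) ↔
      (cellM m i j ≠ 0 ∧ AllOne m (i+1) j k ∧ AllOne m i j k ∧ AllOne m i (j+1) k) := by
  constructor
  · intro h
    refine ⟨h i j (by omega) (by omega) (by omega) (by omega), ?_, ?_, ?_⟩ <;>
      (intro x y hx1 hx2 hy1 hy2; exact h x y (by omega) (by omega) (by omega) (by omega))
  · rintro ⟨hc, h1, h2, h3⟩ x y hx1 hx2 hy1 hy2
    by_cases hxi : x = i
    · by_cases hyj : y = j
      · subst hxi; subst hyj; exact hc
      · exact h1 x y (by omega) (by omega) (by omega) (by omega)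
    · by_cases hyj : y = j
      · exact h3 x y (by omega) (by omega) (by omega) (by omega)
      · exact h2 x y (by omega) (by omega) (by omega) (by omega)

theorem allone_iff (m : List (List Int)) :
    ∀ k i j, k ≤ i → k ≤ j → (AllOne m i j k ↔ k ≤ sM m i j) := by
  intro k
  induction k with
  | zero =>
    intro i j _ _
    constructor
    · intro _; omega
    · intro _ x y hx1 hx2 _ _; omega
  | succ k ih =>
    intro i j hi hj
    match i, j with
    | i+1, j+1 =>
      rw [allone_succ m i j k (by omega) (by omega), sM]
      by_cases hc : cellM m i j = 0
      · simp [hc]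
      · rw [ih (i+1) j (by omega) (by omega), ih i j (by omega) (by omega),
            ih i (j+1) (by omega) (by omega)]
        simp only [hc, if_neg, ne_eq, not_false_eq_true, true_and]
        omega

theorem psN_zero_left (m : List (List Int)) (j : Nat) : psN m 0 j = 0 := by simp [psN]
theorem psN_zero_right (m : List (List Int)) (i : Nat) : psN m i 0 = 0 := by simp [psN]

theorem psN_succ_succ (m : List (List Int)) (i j : Nat) :
    psN m (i+1) (j+1) + psN m i j = psN m i (j+1) + psN m (i+1) j + bN m i j := by
  simp only [psN, Finset.sum_range_succ]
  omega

theorem block_sum (m : List (List Int)) (i j k : Nat) (hk : k ≤ i) (hk' : k ≤ j) :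
    (psN m i j : Int) - psN m (i-k) j - psN m i (j-k) + psN m (i-k) (j-k)
      = ∑ x ∈ Finset.Ico (i-k) i, ∑ y ∈ Finset.Ico (j-k) j, (bN m x y : Int) := by
  have hcast : ∀ a b : Nat, (psN m a b : Int)
      = ∑ x ∈ Finset.range a, ∑ y ∈ Finset.range b, (bN m x y : Int) := by
    intro a b; simp [psN]
  rw [hcast, hcast, hcast, hcast]
  have hrow : ∀ x : Nat, ∑ y ∈ Finset.Ico (j-k) j, (bN m x y : Int)
      = ∑ y ∈ Finset.range j, (bN m x y : Int) - ∑ y ∈ Finset.range (j-k), (bN m x y : Int) :=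
    fun x => Finset.sum_Ico_eq_sub _ (by omega)
  calc ∑ x ∈ Finset.range i, ∑ y ∈ Finset.range j, (bN m x y : Int)
        - ∑ x ∈ Finset.range (i-k), ∑ y ∈ Finset.range j, (bN m x y : Int)
        - ∑ x ∈ Finset.range i, ∑ y ∈ Finset.range (j-k), (bN m x y : Int)
        + ∑ x ∈ Finset.range (i-k), ∑ y ∈ Finset.range (j-k), (bN m x y : Int)
      = (∑ x ∈ Finset.Ico (i-k) i, ∑ y ∈ Finset.range j, (bN m x y : Int))
        - ∑ x ∈ Finset.Ico (i-k) i, ∑ y ∈ Finset.range (j-k), (bN m x y : Int) := by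
        rw [Finset.sum_Ico_eq_sub _ (show i - k ≤ i by omega),
            Finset.sum_Ico_eq_sub _ (show i - k ≤ i by omega)]
        ring
    _ = ∑ x ∈ Finset.Ico (i-k) i, ∑ y ∈ Finset.Ico (j-k) j, (bN m x y : Int) := by
        rw [← Finset.sum_sub_distrib]
        exact Finset.sum_congr rfl (fun x _ => (hrow x).symm)

theorem block_iff (m : List (List Int)) (i j k : Nat) (hk : k ≤ i) (hk' : k ≤ j) :
    ((∑ x ∈ Finset.Ico (i-k) i, ∑ y ∈ Finset.Ico (j-k) j, (bN m x y : Int)) = (k*k : Nat))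
      ↔ AllOne m i j k := by
  have hN : (∑ x ∈ Finset.Ico (i-k) i, ∑ y ∈ Finset.Ico (j-k) j, (bN m x y : Int))
      = ((∑ x ∈ Finset.Ico (i-k) i, ∑ y ∈ Finset.Ico (j-k) j, bN m x y : Nat) : Int) := by
    push_cast; rfl
  rw [hN, Int.natCast_inj]
  have hone : ∑ x ∈ Finset.Ico (i-k) i, ∑ y ∈ Finset.Ico (j-k) j, (1:Nat) = k * k := by
    simp [Nat.card_Ico]
    have e1 : i - (i - k) = k := by omega
    have e2 : j - (j - k) = k := by omega
    rw [e1, e2]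
  constructor
  · intro h x y hx1 hx2 hy1 hy2
    have hle : ∀ x ∈ Finset.Ico (i-k) i, ∑ y ∈ Finset.Ico (j-k) j, bN m x y
        ≤ ∑ y ∈ Finset.Ico (j-k) j, (1:Nat) := by
      intro x _
      exact Finset.sum_le_sum (fun y _ => by unfold bN; split <;> omega)
    rw [← hone] at h
    have hall := (Finset.sum_eq_sum_iff_of_le hle).mp h x (Finset.mem_Ico.mpr ⟨hx1, hx2⟩)
    have hle2 : ∀ y ∈ Finset.Ico (j-k) j, bN m x y ≤ (1:Nat) :=
      fun y _ => by unfold bN; split <;> omega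
    have h2 := (Finset.sum_eq_sum_iff_of_le hle2).mp hall y (Finset.mem_Ico.mpr ⟨hy1, hy2⟩)
    unfold bN at h2
    by_contra hc
    simp [hc] at h2
  · intro h
    rw [← hone]
    refine Finset.sum_congr rfl (fun x hx => Finset.sum_congr rfl (fun y hy => ?_))
    rw [Finset.mem_Ico] at hx hy
    have := h x y hx.1 hx.2 hy.1 hy.2
    simp [bN, this]

def tabA (m : List (List Int)) (r c I J : Nat) : List (List Int) :=
  (List.range (r+1)).map (fun i => (List.range (c+1)).map
    (fun j => if i < I ∨ (i = I ∧ j ≤ J) then (sM m i j : Int) else 0))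

theorem get_cell (m : List (List Int)) (x y : Nat) :
    pvGet2 m (x:Int) (y:Int) = cellM m x y := by
  unfold pvGet2 cellM
  rw [PySem.List.pyGetD_natCast, PySem.List.pyGetD_natCast]

theorem get_tabA (m : List (List Int)) (r c I J i j : Nat) (hi : i ≤ r) (hj : j ≤ c) :
    pvGet2 (tabA m r c I J) (i:Int) (j:Int)
      = if i < I ∨ (i = I ∧ j ≤ J) then (sM m i j : Int) else 0 := by
  unfold pvGet2 tabA
  simp only [PySem.List.pyGetD_natCast]
  rw [PySem.List.getD_map_range _ _ _ _ (by omega), PySem.List.getD_map_range _ _ _ _ (by omega)]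

theorem set_map_range {β : Type} (f : Nat → β) (n i : Nat) (v : β) (h : i < n) :
    ((List.range n).map f).set i v = (List.range n).map (fun k => if k = i then v else f k) := by
  apply List.ext_getElem
  · simp
  · intro k h1 h2
    simp only [List.getElem_set, List.getElem_map, List.getElem_range]
    simp only [List.length_map, List.length_range] at h1
    rcases eq_or_ne i k with h' | h' <;> simp [h', eq_comm]

theorem set_tabA (m : List (List Int)) (r c I J : Nat) (hI1 : 1 ≤ I) (hI : I ≤ r) (hJ : J < c) :
    pvSet2 (tabA m r c I J) (I:Int) (((J+1:Nat)):Int) ((sM m I (J+1) : Int))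
      = tabA m r c I (J+1) := by
  unfold pvSet2 tabA
  rw [PySem.List.pyGetD_natCast, PySem.List.getD_map_range _ _ _ _ (by omega),
      PySem.List.pySetD_natCast, PySem.List.pySetD_natCast,
      set_map_range _ _ _ _ (by omega), set_map_range _ _ _ _ (by omega)]
  refine List.map_congr_left (fun i hi => ?_)
  rw [List.mem_range] at hi
  rcases eq_or_ne i I with h' | h'
  · subst h'
    simp only [if_pos rfl]
    refine List.map_congr_left (fun j hj => ?_)
    rw [List.mem_range] at hj
    rcases eq_or_ne j (J+1) with h'' | h''
    · subst h''; simp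
    · simp only [if_neg h'']
      simp only [lt_self_iff_false, true_and, false_or]
      split_ifs with g1 g2 <;> first | rfl | omega
  · simp only [if_neg h']
    refine List.map_congr_left (fun j hj => ?_)
    have e : (i < I ∨ (i = I ∧ j ≤ J)) ↔ (i < I ∨ (i = I ∧ j ≤ J+1)) := by omega
    rw [if_congr e rfl rfl]

theorem stepA (m : List (List Int)) (r c i J : Nat) (hi1 : 1 ≤ i) (hir : i ≤ r) (hJ : J < c)
    (cnt : Int) :
    pvAinner m (i:Int) (tabA m r c i J, cnt) ((1:Int)+(J:Int))
      = (tabA m r c i (J+1), cnt + (sM m i (J+1) : Int)) := by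
  obtain ⟨i', rfl⟩ : ∃ i', i = i'+1 := ⟨i-1, by omega⟩
  unfold pvAinner
  have e1 : (((i'+1 : Nat)):Int) - 1 = ((i' : Nat):Int) := by push_cast; ring
  have e3 : ((1:Int)+(J:Int)) = (((J+1):Nat):Int) := by push_cast; ring
  have e2' : ((((J+1):Nat)):Int) - 1 = ((J:Nat):Int) := by push_cast; ring
  simp only [e1, e3, e2', get_cell]
  have g1 : cellM (tabA m r c (i'+1) J) (i'+1) J = (sM m (i'+1) J : Int) := by
    rw [← get_cell, get_tabA m r c (i'+1) J (i'+1) J (by omega) (by omega), if_pos (by omega)]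
  have g2 : cellM (tabA m r c (i'+1) J) i' J = (sM m i' J : Int) := by
    rw [← get_cell, get_tabA m r c (i'+1) J i' J (by omega) (by omega), if_pos (by omega)]
  have g3 : cellM (tabA m r c (i'+1) J) i' (J+1) = (sM m i' (J+1) : Int) := by
    rw [← get_cell, get_tabA m r c (i'+1) J i' (J+1) (by omega) (by omega), if_pos (by omega)]
  simp only [g1, g2, g3]
  have hv : (if cellM m i' J = 0 then cellM m i' J
      else min (min ((sM m (i'+1) J : Int)) ((sM m i' J : Int))) ((sM m i' (J+1) : Int)) + 1)
      = (sM m (i'+1) (J+1) : Int) := by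
    rw [sM]
    split_ifs with hc
    · simp [hc]
    · push_cast [Nat.cast_min]
      ring
  rw [hv, set_tabA m r c (i'+1) J (by omega) (by omega) hJ]

theorem innerA (m : List (List Int)) (r c i : Nat) (hi1 : 1 ≤ i) (hir : i ≤ r) :
    ∀ J, J ≤ c → ∀ cnt : Int,
      (List.range J).foldl (fun st (k : Nat) => pvAinner m (i:Int) st (1+(k:Int))) (tabA m r c i 0, cnt)
        = (tabA m r c i J, cnt + ∑ j ∈ Finset.range J, (sM m i (j+1) : Int)) := by
  intro J
  induction J with
  | zero => intro _ cnt; simp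
  | succ J ih =>
    intro hJ cnt
    rw [List.range_succ, List.foldl_append, ih (by omega), List.foldl_cons, List.foldl_nil,
        stepA m r c i J hi1 hir (by omega), Finset.sum_range_succ]
    ring_nf

theorem tabA_step (m : List (List Int)) (r c I : Nat) :
    tabA m r c I c = tabA m r c (I+1) 0 := by
  unfold tabA
  refine List.map_congr_left (fun i hi => ?_)
  refine List.map_congr_left (fun j hj => ?_)
  rw [List.mem_range] at hi hj
  by_cases hij : i ≤ I
  · rw [if_pos (by omega), if_pos (by omega)]
  · by_cases hi2 : i = I+1 ∧ j = 0
    · rw [if_neg (by omega), if_pos (by omega)]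
      obtain ⟨_, rfl⟩ := hi2
      rw [sM_zero_right]
      simp
    · rw [if_neg (by omega), if_neg (by omega)]

theorem outerA (m : List (List Int)) (r c : Nat) :
    ∀ I, I ≤ r → ∀ cnt : Int,
      (List.range I).foldl (fun st (k : Nat) => pvAouter m c st (1+(k:Int))) (tabA m r c 0 c, cnt)
        = (tabA m r c I c,
           cnt + ∑ i ∈ Finset.range I, ∑ j ∈ Finset.range c, (sM m (i+1) (j+1) : Int)) := by
  intro I
  induction I with
  | zero => intro _ cnt; simp
  | succ I ih =>
    intro hI cnt
    rw [List.range_succ, List.foldl_append, ih (by omega), List.foldl_cons, List.foldl_nil]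
    unfold pvAouter
    have e : (1 + (I:Int)) = (((I+1 : Nat)):Int) := by push_cast; ring
    rw [e, PySem.List.pyRange_one]
    have e2 : (((c:Int)+1) - 1).toNat = c := by omega
    rw [e2, List.foldl_map]
    have e3 : ∀ (st : List (List Int) × Int) (k : Nat),
        pvAinner m (((I+1:Nat)):Int) st ((1:Int)+(k:Int))
          = pvAinner m (((I+1:Nat)):Int) st (1+(k:Int)) := fun _ _ => rfl
    rw [tabA_step m r c I]
    rw [innerA m r c (I+1) (by omega) (by omega) c (by omega)]
    rw [Finset.sum_range_succ]
    ring_nf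

theorem A_eq_sum (m : List (List Int)) (h : m ≠ []) :
    count_squares_dp_2 m =
      ∑ i ∈ Finset.range m.length, ∑ j ∈ Finset.range (m.headD []).length,
        (sM m (i+1) (j+1) : Int) := by
  simp only [count_squares_dp_2, if_neg h]
  set r := m.length with hr
  set c := (m.headD []).length with hc
  have hdp0 : (PySem.List.pyRange 0 ((r : Int)+1) 1).map (fun _ => List.replicate (c+1) (0 : Int))
      = tabA m r c 0 c := by
    have e : ((r:Int)+1) = (((r+1 : Nat)):Int) := by push_cast; ring
    rw [e, PySem.List.pyRange_zero_nat, List.map_map]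
    unfold tabA
    refine List.map_congr_left (fun i hi => ?_)
    rw [List.mem_range] at hi
    refine List.ext_getElem (by simp) ?_
    intro j hj1 hj2
    simp only [Function.comp_apply, List.getElem_replicate, List.getElem_map, List.getElem_range]
    simp only [List.length_map, List.length_range] at hj2
    split_ifs with g
    · have hi0 : i = 0 := by omega
      subst hi0
      rw [sM_zero_left]
      simp
    · rfl
  rw [hdp0, PySem.List.pyRange_one]
  have e2 : (((r:Int)+1) - 1).toNat = r := by omega
  rw [e2, List.foldl_map]
  rw [outerA m r c r (by omega) 0]
  simp


-- partial prefix table: rows 0..I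
def Ptab (m : List (List Int)) (c I : Nat) : List (List Int) :=
  (List.range (I+1)).map (fun i => (List.range (c+1)).map (fun j => (psN m i j : Int)))

theorem get_Ptab (m : List (List Int)) (c I i j : Nat) (hi : i ≤ I) (hj : j ≤ c) :
    pvGet2 (Ptab m c I) (i:Int) (j:Int) = (psN m i j : Int) := by
  unfold pvGet2 Ptab
  simp only [PySem.List.pyGetD_natCast]
  rw [PySem.List.getD_map_range _ _ _ _ (by omega), PySem.List.getD_map_range _ _ _ _ (by omega)]

theorem bin_cast (m : List (List Int)) (x y : Nat) :
    (if cellM m x y ≠ 0 then (1:Int) else 0) = (bN m x y : Int) := by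
  unfold bN
  split_ifs <;> simp_all

theorem rowB (m : List (List Int)) (c I : Nat) :
    ∀ J, J ≤ c →
      (List.range J).foldl (fun row (k : Nat) => pvBrow m (Ptab m c I) (I:Int) row (k:Int)) [0]
        = (List.range (J+1)).map (fun j => (psN m (I+1) j : Int)) := by
  intro J
  induction J with
  | zero => intro _; simp [psN_zero_right]
  | succ J ih =>
    intro hJ
    rw [List.range_succ, List.foldl_append, ih (by omega), List.foldl_cons, List.foldl_nil]
    unfold pvBrow
    have e1 : ((J:Nat):Int) + 1 = (((J+1):Nat):Int) := by push_cast; ring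
    rw [e1, get_Ptab m c I I (J+1) (by omega) (by omega), get_Ptab m c I I J (by omega) (by omega),
        PySem.List.pyGetD_natCast, PySem.List.getD_map_range _ _ _ _ (by omega), get_cell,
        bin_cast]
    rw [show (List.range (J+1+1)) = List.range (J+1) ++ [J+1] from List.range_succ,
        List.map_append]
    congr 1
    have hps := psN_succ_succ m I J
    simp only [List.map_cons, List.map_nil]
    congr 1
    omega

theorem prefB (m : List (List Int)) (c : Nat) :
    ∀ I, (List.range I).foldl (fun P (k : Nat) => pvBpref m c P (k:Int))
        [List.replicate (c+1) (0:Int)]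
      = Ptab m c I := by
  intro I
  induction I with
  | zero =>
    simp only [List.range_zero, List.foldl_nil]
    unfold Ptab
    have e : (List.range (0+1)).map
        (fun i => (List.range (c+1)).map (fun j => (psN m i j : Int)))
        = [(List.range (c+1)).map (fun j => (psN m 0 j : Int))] := by simp
    rw [e]
    congr 1
    refine List.ext_getElem (by simp) ?_
    intro j h1 h2
    simp [psN_zero_left]
  | succ I ih =>
    rw [List.range_succ, List.foldl_append, ih, List.foldl_cons, List.foldl_nil]
    unfold pvBpref
    rw [PySem.List.pyRange_zero_nat, List.foldl_map, rowB m c I c (by omega)]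
    unfold Ptab
    rw [show (List.range (I+1+1)) = List.range (I+1) ++ [I+1] from List.range_succ,
        List.map_append]
    rfl

theorem countk (M S : Nat) :
    ∀ cnt : Int, (PySem.List.pyRange 1 ((M:Int)+1) 1).foldl
        (fun cnt k => if k ≤ (S:Int) then cnt + 1 else cnt) cnt
      = cnt + min S M := by
  induction M with
  | zero =>
    intro cnt
    rw [PySem.List.pyRange_one_eq_nil (by norm_num)]
    simp
  | succ M ih =>
    intro cnt
    have e : ((M+1 : Nat):Int) + 1 = ((M:Int)+1) + 1 := by push_cast; ring
    rw [e, PySem.List.pyRange_one_succ_right (by omega), List.foldl_append, ih,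
        List.foldl_cons, List.foldl_nil]
    split_ifs with g
    · have : M + 1 ≤ S := by exact_mod_cast g
      have : min S (M+1) = min S M + 1 := by omega
      rw [this]
      push_cast
      ring
    · have : ¬ (M + 1 ≤ S) := by exact_mod_cast g
      have : min S (M+1) = min S M := by omega
      rw [this]

theorem jcell (m : List (List Int)) (c R I J : Nat) (hI : I < R) (hJ : J < c) (cnt : Int) :
    pvBj (Ptab m c R) (((I+1:Nat)):Int) cnt (((J+1:Nat)):Int)
      = cnt + (sM m (I+1) (J+1) : Int) := by
  unfold pvBj
  have hmin : min (((I+1:Nat)):Int) (((J+1:Nat)):Int) = ((min (I+1) (J+1) : Nat) : Int) := by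
    push_cast [Nat.cast_min]
    rfl
  set M := min (I+1) (J+1) with hM
  have hS : sM m (I+1) (J+1) ≤ M := by
    have := sM_le_min m ((I+1)+(J+1)) (I+1) (J+1) (by omega)
    omega
  rw [hmin]
  have hcong : ∀ (acc : Int), ∀ k ∈ PySem.List.pyRange 1 ((M:Int)+1) 1,
      pvBk (Ptab m c R) (((I+1:Nat)):Int) (((J+1:Nat)):Int) acc k
        = (fun cnt k => if k ≤ ((sM m (I+1) (J+1) : Nat):Int) then cnt + 1 else cnt) acc k := by
    intro acc k hk
    rw [PySem.List.mem_pyRange_one] at hk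
    obtain ⟨k', rfl⟩ : ∃ k' : Nat, k = (k' : Int) := ⟨k.toNat, by omega⟩
    have hk1 : 1 ≤ k' := by exact_mod_cast hk.1
    have hkM : k' ≤ M := by
      have := hk.2
      omega
    unfold pvBk
    have eik : ((I+1:Nat):Int) - (k':Int) = (((I+1-k' : Nat)):Int) := by
      have : k' ≤ I + 1 := by omega
      push_cast [this]
      ring
    have ejk : ((J+1:Nat):Int) - (k':Int) = (((J+1-k' : Nat)):Int) := by
      have : k' ≤ J + 1 := by omega
      push_cast [this]
      ring
    rw [eik, ejk,
        get_Ptab m c R (I+1) (J+1) (by omega) (by omega),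
        get_Ptab m c R (I+1-k') (J+1) (by omega) (by omega),
        get_Ptab m c R (I+1) (J+1-k') (by omega) (by omega),
        get_Ptab m c R (I+1-k') (J+1-k') (by omega) (by omega)]
    have hiff : ((psN m (I+1) (J+1) : Int) - (psN m (I+1-k') (J+1) : Int)
          - (psN m (I+1) (J+1-k') : Int) + (psN m (I+1-k') (J+1-k') : Int)
          = (k':Int) * (k':Int))
        ↔ (k' ≤ sM m (I+1) (J+1)) := by
      rw [block_sum m (I+1) (J+1) k' (by omega) (by omega)]
      have : ((k':Int) * (k':Int)) = ((k'*k' : Nat) : Int) := by push_cast; ring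
      rw [this, block_iff m (I+1) (J+1) k' (by omega) (by omega)]
      exact allone_iff m k' (I+1) (J+1) (by omega) (by omega)
    have hiff2 : ((psN m (I+1) (J+1) : Int) - (psN m (I+1-k') (J+1) : Int)
          - (psN m (I+1) (J+1-k') : Int) + (psN m (I+1-k') (J+1-k') : Int)
          = (k':Int) * (k':Int))
        ↔ ((k':Int) ≤ ((sM m (I+1) (J+1) : Nat):Int)) := by
      rw [hiff]
      exact_mod_cast Iff.rfl
    rw [if_congr hiff2 rfl rfl]
  rw [PySem.List.foldl_congr_mem _ _ _ _ hcong, countk M (sM m (I+1) (J+1)) cnt]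
  congr 1
  omega

theorem jfoldB (m : List (List Int)) (c R I : Nat) (hI : I < R) :
    ∀ Jm, Jm ≤ c → ∀ cnt : Int,
      (List.range Jm).foldl
          (fun cnt (k : Nat) => pvBj (Ptab m c R) (((I+1:Nat)):Int) cnt (1+(k:Int))) cnt
        = cnt + ∑ j ∈ Finset.range Jm, (sM m (I+1) (j+1) : Int) := by
  intro Jm
  induction Jm with
  | zero => intro _ cnt; simp
  | succ J ih =>
    intro hJ cnt
    rw [List.range_succ, List.foldl_append, ih (by omega), List.foldl_cons, List.foldl_nil]
    have e : (1:Int) + (J:Int) = (((J+1:Nat)):Int) := by push_cast; ring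
    rw [e, jcell m c R I J hI (by omega), Finset.sum_range_succ]
    ring_nf

theorem ifoldB (m : List (List Int)) (c R : Nat) :
    ∀ Im, Im ≤ R → ∀ cnt : Int,
      (List.range Im).foldl (fun cnt (k : Nat) => pvBi (Ptab m c R) c cnt (1+(k:Int))) cnt
        = cnt + ∑ i ∈ Finset.range Im, ∑ j ∈ Finset.range c, (sM m (i+1) (j+1) : Int) := by
  intro Im
  induction Im with
  | zero => intro _ cnt; simp
  | succ I ih =>
    intro hI cnt
    rw [List.range_succ, List.foldl_append, ih (by omega), List.foldl_cons, List.foldl_nil]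
    unfold pvBi
    have e : (1:Int) + (I:Int) = (((I+1:Nat)):Int) := by push_cast; ring
    have e2 : ((c:Int)+1) = (((c+1:Nat)):Int) := by push_cast; ring
    rw [e, e2, PySem.List.pyRange_one]
    have e3 : (((c+1 : Nat):Int) - 1).toNat = c := by omega
    rw [e3, List.foldl_map]
    rw [jfoldB m c R I (by omega) c (by omega)]
    rw [Finset.sum_range_succ]
    ring_nf

theorem B_eq_sum (m : List (List Int)) (h : m ≠ []) :
    count_squares_dp_2_alt m =
      ∑ i ∈ Finset.range m.length, ∑ j ∈ Finset.range (m.headD []).length,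
        (sM m (i+1) (j+1) : Int) := by
  simp only [count_squares_dp_2_alt, if_neg h]
  set r := m.length with hr
  set c := (m.headD []).length with hc
  have hpref : (PySem.List.pyRange 0 ((r : Int)) 1).foldl (pvBpref m c)
      [List.replicate (c+1) (0 : Int)] = Ptab m c r := by
    rw [PySem.List.pyRange_zero_nat, List.foldl_map]
    exact prefB m c r
  rw [hpref, PySem.List.pyRange_one]
  have e2 : (((r:Int)+1) - 1).toNat = r := by omega
  rw [e2, List.foldl_map]
  rw [ifoldB m c r r (by omega) 0]
  simp

-- ===== VERDICT (by name: the statement is the Claim_ definition above) =====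
theorem count_squares_dp_2_spec : Claim_equal_count_squares_dp_2 := by
  intro m _ _
  unfold Spec_count_squares_dp_2
  by_cases h : m = []
  · subst h; rfl
  · rw [A_eq_sum m h, B_eq_sum m h]
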